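-- pv_equiv track=rewrite | github.com/heejudy/PCCP-Study | jungki/13주차/42898. 등굣길/등굣길.py | solution
-- ===== SOURCE A (Python) =====
-- def solution(m, n, puddles):
--     dp = [[0] * m for _ in range(n)]
--     MOD = 1000000007
--     dp[0][0] = 1
--     check = False
--
--     for i in range(m):
--         if [i+1,1] in puddles:
--             check = True
--             dp[0][i] = 0
--         elif not check:
--             dp[0][i] = 1
--         elif check:
--             dp[0][i] = 0
--
--     check = False
--
--     for j in range(n):
--         if [1,j+1] in puddles:
--             check = True
--             dp[j][0] = 0
--         elif not check:
--             dp[j][0] = 1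
--         elif check:
--             dp[j][0] = 0
--
--     for i in range(1,n):
--         for j in range(1,m):
--             dp[i][j] = (dp[i-1][j] + dp[i][j-1]) % MOD
--             if [j+1,i+1] in puddles:
--                 dp[i][j] = 0
--
--     return dp[n-1][m-1]
-- ===== SOURCE B (Python) =====
-- def solution(m, n, puddles):
--     MOD = 1000000007
--     memo = [[None] * m for _ in range(n)]
--     stack = [(n - 1, m - 1)]
--     while stack:
--         i, j = stack[-1]
--         if memo[i][j] is not None:
--             stack.pop()
--         elif [j + 1, i + 1] in puddles:
--             memo[i][j] = 0
--             stack.pop()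
--         elif i == 0 and j == 0:
--             memo[i][j] = 1
--             stack.pop()
--         else:
--             deps = []
--             if i > 0 and memo[i - 1][j] is None:
--                 deps.append((i - 1, j))
--             if j > 0 and memo[i][j - 1] is None:
--                 deps.append((i, j - 1))
--             if deps:
--                 stack.extend(deps)
--             else:
--                 top = memo[i - 1][j] if i > 0 else 0
--                 left = memo[i][j - 1] if j > 0 else 0
--                 memo[i][j] = (top + left) % MOD
--                 stack.pop()
--     return memo[n - 1][m - 1]
-- ===== Notes on version B (the rewrite author's own statement) =====
-- stated objective: alternative
-- what changed: A fills the n*m table bottom-up in three staged passes (first row and first column driven by a stateful flag, then an interior double loop); B evaluates the path count top-down, demand-driven from the target cell, with an explicit worklist stack and a memo table of None sentinels, computing only the cells the target actually depends on.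
import Mathlib
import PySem

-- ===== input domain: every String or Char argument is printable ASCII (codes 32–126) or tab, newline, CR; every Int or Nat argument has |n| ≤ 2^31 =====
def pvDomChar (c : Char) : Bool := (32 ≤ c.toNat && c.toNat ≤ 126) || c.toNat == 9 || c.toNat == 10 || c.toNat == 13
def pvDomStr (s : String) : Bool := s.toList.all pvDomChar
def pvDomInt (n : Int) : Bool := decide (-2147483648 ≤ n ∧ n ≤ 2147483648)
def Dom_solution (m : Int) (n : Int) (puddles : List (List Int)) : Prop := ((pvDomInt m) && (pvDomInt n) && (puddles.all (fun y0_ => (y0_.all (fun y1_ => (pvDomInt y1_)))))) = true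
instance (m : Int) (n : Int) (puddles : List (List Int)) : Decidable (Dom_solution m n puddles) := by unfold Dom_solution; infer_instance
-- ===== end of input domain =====

-- B replaces A's bottom-up three-pass table fill by a top-down demand-driven memoized
-- evaluation from the target cell with an explicit worklist stack and a dict memo;
-- objective: alternative (same asymptotic cost, different algorithmic strategy).

-- ===== PORT A =====
-- dp[i][j] read/write helpers for A's 2D list (indices are nonnegative at every use site)
def pvGet2 (dp : List (List Int)) (i j : Nat) : Int := (dp.getD i []).getD j 0
def pvSet2 (dp : List (List Int)) (i j : Nat) (v : Int) : List (List Int) :=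
  dp.set i ((dp.getD i []).set j v)

def solution (m : Int) (n : Int) (puddles : List (List Int)) : Int :=
  -- dp = [[0] * m for _ in range(n)]
  let dp0 : List (List Int) := (PySem.List.pyRange 0 n 1).map (fun _ => List.replicate m.toNat 0)
  -- dp[0][0] = 1
  let dp1 := pvSet2 dp0 0 0 1
  -- first-row pass with the stateful `check` flag
  let s1 := (PySem.List.pyRange 0 m 1).foldl (fun (s : List (List Int) × Bool) i =>
      if puddles.contains [i + 1, 1] then (pvSet2 s.1 0 i.toNat 0, true)
      else if !s.2 then (pvSet2 s.1 0 i.toNat 1, s.2)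
      else (pvSet2 s.1 0 i.toNat 0, s.2)) (dp1, false)
  -- first-column pass with the stateful `check` flag
  let s2 := (PySem.List.pyRange 0 n 1).foldl (fun (s : List (List Int) × Bool) j =>
      if puddles.contains [1, j + 1] then (pvSet2 s.1 j.toNat 0 0, true)
      else if !s.2 then (pvSet2 s.1 j.toNat 0 1, s.2)
      else (pvSet2 s.1 j.toNat 0 0, s.2)) (s1.1, false)
  -- interior double loop
  let dp2 := (PySem.List.pyRange 1 n 1).foldl (fun dp i =>
      (PySem.List.pyRange 1 m 1).foldl (fun dp j =>
        let dp' := pvSet2 dp i.toNat j.toNat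
          (PySem.Int.mod (pvGet2 dp (i.toNat - 1) j.toNat + pvGet2 dp i.toNat (j.toNat - 1)) 1000000007)
        if puddles.contains [j + 1, i + 1] then pvSet2 dp' i.toNat j.toNat 0 else dp') dp) s2.1
  pvGet2 dp2 (n - 1).toNat (m - 1).toNat

-- ===== PORT B =====
-- memo[i][j] read: Python indexing (wrap/IndexError for bad indices) — it can raise only
-- when m < 1 or n < 1, which Pre_solution excludes; on the nonnegative in-range indices
-- used everywhere under Pre_ this is exact (none = unmemoized cell)
def pvRowB (memo : List (List (Option Int))) (i : Int) : List (Option Int) :=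
  (PySem.List.pyGet? memo i).getD []
def pvCellB (memo : List (List (Option Int))) (i j : Int) : Option Int :=
  (PySem.List.pyGet? (pvRowB memo i) j).join
-- memo[i][j] = v: the indices are nonnegative and in range at every use site under Pre_
def pvWriteB (memo : List (List (Option Int))) (i j : Int) (v : Int) : List (List (Option Int)) :=
  memo.set i.toNat ((pvRowB memo i).set j.toNat (some v))

-- deps = []; if i>0 and memo[i-1][j] is None: append; if j>0 and memo[i][j-1] is None: append
def pvDeps (memo : List (List (Option Int))) (i j : Int) : List (Int × Int) :=
  (if i > 0 && (pvCellB memo (i - 1) j).isNone then [(i - 1, j)] else [])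
    ++ (if j > 0 && (pvCellB memo i (j - 1)).isNone then [(i, j - 1)] else [])

-- one iteration of B's `while stack:` body; the Python stack's top is its last element,
-- here the stack is held top-first, so `stack.extend(deps)` prepends `deps.reverse`
def pvStepB (pd : List (List Int)) (st : List (Int × Int) × List (List (Option Int))) :
    List (Int × Int) × List (List (Option Int)) :=
  match st with
  | ([], memo) => ([], memo)
  | ((i, j) :: rest, memo) =>
    if (pvCellB memo i j).isSome then (rest, memo)
    else if pd.contains [j + 1, i + 1] then (rest, pvWriteB memo i j 0)
    else if i == 0 && j == 0 then (rest, pvWriteB memo i j 1)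
    else
      let deps := pvDeps memo i j
      if !deps.isEmpty then (deps.reverse ++ (i, j) :: rest, memo)
      else
        -- memo[i-1][j] / memo[i][j-1] hold ints here (deps = []), so `.getD 0` is exact
        let top := if i > 0 then (pvCellB memo (i - 1) j).getD 0 else 0
        let left := if j > 0 then (pvCellB memo i (j - 1)).getD 0 else 0
        (rest, pvWriteB memo i j (PySem.Int.mod (top + left) 1000000007))

-- the `while stack:` loop; the fuel argument is only a totality guard, proved sufficient
-- under Pre_solution (pvProc bounds the number of iterations by 4^(s+1))
def pvLoopB (pd : List (List Int)) :
    Nat → (List (Int × Int) × List (List (Option Int))) → List (List (Option Int))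
  | _, ([], memo) => memo
  | 0, (_ :: _, memo) => memo
  | fuel + 1, (p :: rest, memo) => pvLoopB pd fuel (pvStepB pd (p :: rest, memo))

def solution_alt (m : Int) (n : Int) (puddles : List (List Int)) : Int :=
  -- memo = [[None] * m for _ in range(n)]
  let memo0 : List (List (Option Int)) :=
    (PySem.List.pyRange 0 n 1).map (fun _ => List.replicate m.toNat none)
  let fuel := 4 ^ (((n - 1) + (m - 1)).toNat + 1)
  -- return memo[n-1][m-1]: an int under Pre_, so `.getD 0` is exact
  (pvCellB (pvLoopB puddles fuel ([(n - 1, m - 1)], memo0)) (n - 1) (m - 1)).getD 0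

-- ===== PRECONDITION & SPEC =====
-- Pre_: A raises IndexError when m < 1 or n < 1 (dp[0][0] on an empty table / final negative index).
def Pre_solution (m : Int) (n : Int) (puddles : List (List Int)) : Prop := 1 ≤ m ∧ 1 ≤ n
instance (m : Int) (n : Int) (puddles : List (List Int)) : Decidable (Pre_solution m n puddles) := by unfold Pre_solution; infer_instance
def pvWitness_solution : Int × Int × List (List Int) := (4, 3, [[2, 2]])

def Spec_solution (m : Int) (n : Int) (puddles : List (List Int)) (out : Int) : Prop := out = solution_alt m n puddles
instance (m : Int) (n : Int) (puddles : List (List Int)) (out : Int) : Decidable (Spec_solution m n puddles out) := by unfold Spec_solution; infer_instance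

-- ===== CLAIM (what is proved, stated in full; the proofs are below) =====
def Claim_equal_solution : Prop := ∀ (m : Int) (n : Int) (puddles : List (List Int)), Dom_solution m n puddles → Pre_solution m n puddles → Spec_solution m n puddles (solution m n puddles)

-- ===== LEMMAS AND PROOFS =====

theorem pvSet2_length (dp : List (List Int)) (i j : Nat) (v : Int) :
    (pvSet2 dp i j v).length = dp.length := by simp [pvSet2]

theorem pvSet2_rowlen (dp : List (List Int)) (i j : Nat) (v : Int) (i' : Nat) :
    ((pvSet2 dp i j v).getD i' []).length = (dp.getD i' []).length := by
  unfold pvSet2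
  by_cases h : i = i'
  · subst h
    by_cases hl : i < dp.length
    · simp [List.getD, List.getElem?_set_self hl]
    · rw [List.set_eq_of_length_le (by omega)]
  · simp [List.getD, List.getElem?_set_ne h]

theorem pvGet2_pvSet2_ne (dp : List (List Int)) (i j i' j' : Nat) (v : Int)
    (h : i' ≠ i ∨ j' ≠ j) : pvGet2 (pvSet2 dp i j v) i' j' = pvGet2 dp i' j' := by
  unfold pvGet2 pvSet2
  by_cases hi : i = i'
  · subst hi
    rcases h with h | h
    · omega
    · by_cases hl : i < dp.length
      · simp [List.getD, List.getElem?_set_self hl, List.getElem?_set_ne (fun hh => h hh.symm)]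
      · rw [List.set_eq_of_length_le (by omega)]
  · simp [List.getD, List.getElem?_set_ne hi]

theorem pvGet2_pvSet2_eq (dp : List (List Int)) (i j : Nat) (v : Int)
    (hi : i < dp.length) (hj : j < (dp.getD i []).length) :
    pvGet2 (pvSet2 dp i j v) i j = v := by
  unfold pvGet2 pvSet2
  have hj' : j < (dp[i]?.getD []).length := by simpa [List.getD] using hj
  simp [List.getD, List.getElem?_set_self hi, List.getElem?_set_self hj']

def pvF (pd : List (List Int)) : Nat → Nat → Int
  | 0, 0 => if pd.contains [1, 1] then 0 else 1
  | 0, j + 1 => if pd.contains [(j : Int) + 2, 1] then 0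
      else PySem.Int.mod (0 + pvF pd 0 j) 1000000007
  | i + 1, 0 => if pd.contains [1, (i : Int) + 2] then 0
      else PySem.Int.mod (pvF pd i 0 + 0) 1000000007
  | i + 1, j + 1 => if pd.contains [(j : Int) + 2, (i : Int) + 2] then 0
      else PySem.Int.mod (pvF pd i (j + 1) + pvF pd (i + 1) j) 1000000007

theorem pvF_row0 (pd : List (List Int)) (j : Nat) :
    pvF pd 0 j = if (List.range (j + 1)).any (fun k => pd.contains [(k : Int) + 1, 1]) then 0 else 1 := by
  induction j with
  | zero => simp [pvF]
  | succ j ih =>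
    rw [List.range_succ, List.any_append]
    have hc : ((j + 1 : Nat) : Int) + 1 = (j : Int) + 2 := by push_cast; ring
    simp only [List.any_cons, List.any_nil, Bool.or_false, hc]
    rw [pvF, ih, PySem.Int.mod_eq_emod_of_pos (by norm_num : (0:Int) < 1000000007)]
    cases hp : pd.contains [(j : Int) + 2, 1] <;>
      cases ha : (List.range (j + 1)).any (fun k => pd.contains [(k : Int) + 1, 1]) <;>
      simp [hp, ha]

theorem pvF_col0 (pd : List (List Int)) (i : Nat) :
    pvF pd i 0 = if (List.range (i + 1)).any (fun k => pd.contains [1, (k : Int) + 1]) then 0 else 1 := by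
  induction i with
  | zero => simp [pvF]
  | succ i ih =>
    rw [List.range_succ, List.any_append]
    have hc : ((i + 1 : Nat) : Int) + 1 = (i : Int) + 2 := by push_cast; ring
    simp only [List.any_cons, List.any_nil, Bool.or_false, hc]
    rw [pvF, ih, PySem.Int.mod_eq_emod_of_pos (by norm_num : (0:Int) < 1000000007)]
    cases hp : pd.contains [1, (i : Int) + 2] <;>
      cases ha : (List.range (i + 1)).any (fun k => pd.contains [1, (k : Int) + 1]) <;>
      simp [hp, ha]

def pvShape (dp : List (List Int)) (N M : Nat) : Prop :=
  dp.length = N ∧ ∀ i' < N, (dp.getD i' []).length = M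

theorem pvShape_set2 {dp : List (List Int)} {N M : Nat} (h : pvShape dp N M) (i j : Nat) (v : Int) :
    pvShape (pvSet2 dp i j v) N M := by
  obtain ⟨h1, h2⟩ := h
  exact ⟨by rw [pvSet2_length, h1], fun i' hi' => by rw [pvSet2_rowlen]; exact h2 i' hi'⟩

def pvRowStep (pd : List (List Int)) (s : List (List Int) × Bool) (i : Int) : List (List Int) × Bool :=
  if pd.contains [i + 1, 1] then (pvSet2 s.1 0 i.toNat 0, true)
  else if !s.2 then (pvSet2 s.1 0 i.toNat 1, s.2)
  else (pvSet2 s.1 0 i.toNat 0, s.2)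

theorem pvRowPass (pd : List (List Int)) (N M : Nat) (dp : List (List Int))
    (hsh : pvShape dp N M) (hN : 0 < N) :
    ∀ t, t ≤ M →
    pvShape ((List.range t).foldl (fun s (k : Nat) => pvRowStep pd s (0 + (k : Int))) (dp, false)).1 N M ∧
    ((List.range t).foldl (fun s (k : Nat) => pvRowStep pd s (0 + (k : Int))) (dp, false)).2
      = (List.range t).any (fun k => pd.contains [(k : Int) + 1, 1]) ∧
    (∀ j' < t, pvGet2 ((List.range t).foldl (fun s (k : Nat) => pvRowStep pd s (0 + (k : Int))) (dp, false)).1 0 j' = pvF pd 0 j') ∧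
    (∀ i' j', (i' ≠ 0 ∨ t ≤ j') →
      pvGet2 ((List.range t).foldl (fun s (k : Nat) => pvRowStep pd s (0 + (k : Int))) (dp, false)).1 i' j' = pvGet2 dp i' j') := by
  intro t
  induction t with
  | zero => intro _; exact ⟨hsh, by simp, by omega, fun _ _ _ => rfl⟩
  | succ t ih =>
    intro ht
    obtain ⟨ish, iflag, icell, iun⟩ := ih (by omega)
    rw [List.range_succ, List.foldl_append]
    set s := (List.range t).foldl (fun s (k : Nat) => pvRowStep pd s (0 + (k : Int))) (dp, false) with hs
    have hlen : t < (s.1.getD 0 []).length := by rw [ish.2 0 hN]; omega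
    have hlen0 : 0 < s.1.length := by rw [ish.1]; exact hN
    have htoNat : ((0 : Int) + (t : Int)).toNat = t := by omega
    have hcoord : (0 : Int) + (t : Int) + 1 = (t : Int) + 1 := by ring
    have hrow0 := pvF_row0 pd t
    have hany : (List.range (t + 1)).any (fun k => pd.contains [(k : Int) + 1, 1])
        = ((List.range t).any (fun k => pd.contains [(k : Int) + 1, 1]) || pd.contains [(t : Int) + 1, 1]) := by
      rw [List.range_succ, List.any_append]; simp
    have hanyA : (List.range t ++ [t]).any (fun k => pd.contains [(k : Int) + 1, 1])
        = ((List.range t).any (fun k => pd.contains [(k : Int) + 1, 1]) || pd.contains [(t : Int) + 1, 1]) := by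
      rw [List.any_append]; simp
    simp only [List.foldl_cons, List.foldl_nil, pvRowStep, htoNat, hcoord]
    cases hp : pd.contains [(t : Int) + 1, 1]
    · rw [iflag]
      cases hc : (List.range t).any (fun k => pd.contains [(k : Int) + 1, 1])
      · simp only [hp, Bool.false_eq_true, if_false, Bool.not_false, if_true]
        refine ⟨pvShape_set2 ish _ _ _, by rw [hanyA, hp, hc]; simp, ?_, ?_⟩
        · intro j' hj'
          by_cases hjt : j' = t
          · subst hjt
            rw [pvGet2_pvSet2_eq _ _ _ _ hlen0 hlen, hrow0, hany, hp, hc]; simp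
          · rw [pvGet2_pvSet2_ne _ _ _ _ _ _ (Or.inr hjt)]
            exact icell j' (by omega)
        · intro i' j' h
          rw [pvGet2_pvSet2_ne _ _ _ _ _ _ (by omega)]
          exact iun i' j' (by omega)
      · simp only [hp, Bool.false_eq_true, if_false, Bool.not_true, if_false]
        refine ⟨pvShape_set2 ish _ _ _, by rw [hanyA, hp, hc]; simp, ?_, ?_⟩
        · intro j' hj'
          by_cases hjt : j' = t
          · subst hjt
            rw [pvGet2_pvSet2_eq _ _ _ _ hlen0 hlen, hrow0, hany, hp, hc]; simp
          · rw [pvGet2_pvSet2_ne _ _ _ _ _ _ (Or.inr hjt)]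
            exact icell j' (by omega)
        · intro i' j' h
          rw [pvGet2_pvSet2_ne _ _ _ _ _ _ (by omega)]
          exact iun i' j' (by omega)
    · simp only [hp, if_true]
      refine ⟨pvShape_set2 ish _ _ _, by rw [hanyA, hp]; simp, ?_, ?_⟩
      · intro j' hj'
        by_cases hjt : j' = t
        · subst hjt
          rw [pvGet2_pvSet2_eq _ _ _ _ hlen0 hlen, hrow0, hany, hp]; simp
        · rw [pvGet2_pvSet2_ne _ _ _ _ _ _ (Or.inr hjt)]
          exact icell j' (by omega)
      · intro i' j' h
        rw [pvGet2_pvSet2_ne _ _ _ _ _ _ (by omega)]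
        exact iun i' j' (by omega)

def pvColStep (pd : List (List Int)) (s : List (List Int) × Bool) (j : Int) : List (List Int) × Bool :=
  if pd.contains [1, j + 1] then (pvSet2 s.1 j.toNat 0 0, true)
  else if !s.2 then (pvSet2 s.1 j.toNat 0 1, s.2)
  else (pvSet2 s.1 j.toNat 0 0, s.2)

theorem pvColPass (pd : List (List Int)) (N M : Nat) (dp : List (List Int))
    (hsh : pvShape dp N M) (hM : 0 < M) :
    ∀ t, t ≤ N →
    pvShape ((List.range t).foldl (fun s (k : Nat) => pvColStep pd s (0 + (k : Int))) (dp, false)).1 N M ∧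
    ((List.range t).foldl (fun s (k : Nat) => pvColStep pd s (0 + (k : Int))) (dp, false)).2
      = (List.range t).any (fun k => pd.contains [1, (k : Int) + 1]) ∧
    (∀ i' < t, pvGet2 ((List.range t).foldl (fun s (k : Nat) => pvColStep pd s (0 + (k : Int))) (dp, false)).1 i' 0 = pvF pd i' 0) ∧
    (∀ i' j', j' ≠ 0 ∨ t ≤ i' →
      pvGet2 ((List.range t).foldl (fun s (k : Nat) => pvColStep pd s (0 + (k : Int))) (dp, false)).1 i' j' = pvGet2 dp i' j') := by
  intro t
  induction t with
  | zero => intro _; exact ⟨hsh, by simp, by omega, fun _ _ _ => rfl⟩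
  | succ t ih =>
    intro ht
    obtain ⟨ish, iflag, icell, iun⟩ := ih (by omega)
    rw [List.range_succ, List.foldl_append]
    set s := (List.range t).foldl (fun s (k : Nat) => pvColStep pd s (0 + (k : Int))) (dp, false) with hs
    have hlen : (0 : Nat) < (s.1.getD t []).length := by rw [ish.2 t (by omega)]; omega
    have hlen0 : t < s.1.length := by rw [ish.1]; omega
    have htoNat : ((0 : Int) + (t : Int)).toNat = t := by omega
    have hcoord : (0 : Int) + (t : Int) + 1 = (t : Int) + 1 := by ring
    have hcol0 := pvF_col0 pd t
    have hany : (List.range (t + 1)).any (fun k => pd.contains [1, (k : Int) + 1])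
        = ((List.range t).any (fun k => pd.contains [1, (k : Int) + 1]) || pd.contains [1, (t : Int) + 1]) := by
      rw [List.range_succ, List.any_append]; simp
    have hanyA : (List.range t ++ [t]).any (fun k => pd.contains [1, (k : Int) + 1])
        = ((List.range t).any (fun k => pd.contains [1, (k : Int) + 1]) || pd.contains [1, (t : Int) + 1]) := by
      rw [List.any_append]; simp
    simp only [List.foldl_cons, List.foldl_nil, pvColStep, htoNat, hcoord]
    cases hp : pd.contains [1, (t : Int) + 1]
    · rw [iflag]
      cases hc : (List.range t).any (fun k => pd.contains [1, (k : Int) + 1])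
      · simp only [hp, Bool.false_eq_true, if_false, Bool.not_false, if_true]
        refine ⟨pvShape_set2 ish _ _ _, by rw [hanyA, hp, hc]; simp, ?_, ?_⟩
        · intro i' hi'
          by_cases hit : i' = t
          · subst hit
            rw [pvGet2_pvSet2_eq _ _ _ _ hlen0 hlen, hcol0, hany, hp, hc]; simp
          · rw [pvGet2_pvSet2_ne _ _ _ _ _ _ (Or.inl hit)]
            exact icell i' (by omega)
        · intro i' j' h
          rw [pvGet2_pvSet2_ne _ _ _ _ _ _ (by omega)]
          exact iun i' j' (by omega)
      · simp only [hp, Bool.false_eq_true, if_false, Bool.not_true, if_false]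
        refine ⟨pvShape_set2 ish _ _ _, by rw [hanyA, hp, hc]; simp, ?_, ?_⟩
        · intro i' hi'
          by_cases hit : i' = t
          · subst hit
            rw [pvGet2_pvSet2_eq _ _ _ _ hlen0 hlen, hcol0, hany, hp, hc]; simp
          · rw [pvGet2_pvSet2_ne _ _ _ _ _ _ (Or.inl hit)]
            exact icell i' (by omega)
        · intro i' j' h
          rw [pvGet2_pvSet2_ne _ _ _ _ _ _ (by omega)]
          exact iun i' j' (by omega)
    · simp only [hp, if_true]
      refine ⟨pvShape_set2 ish _ _ _, by rw [hanyA, hp]; simp, ?_, ?_⟩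
      · intro i' hi'
        by_cases hit : i' = t
        · subst hit
          rw [pvGet2_pvSet2_eq _ _ _ _ hlen0 hlen, hcol0, hany, hp]; simp
        · rw [pvGet2_pvSet2_ne _ _ _ _ _ _ (Or.inl hit)]
          exact icell i' (by omega)
      · intro i' j' h
        rw [pvGet2_pvSet2_ne _ _ _ _ _ _ (by omega)]
        exact iun i' j' (by omega)

def pvInnerStep (pd : List (List Int)) (i : Int) (dp : List (List Int)) (j : Int) : List (List Int) :=
  let dp' := pvSet2 dp i.toNat j.toNat
    (PySem.Int.mod (pvGet2 dp (i.toNat - 1) j.toNat + pvGet2 dp i.toNat (j.toNat - 1)) 1000000007)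
  if pd.contains [j + 1, i + 1] then pvSet2 dp' i.toNat j.toNat 0 else dp'

theorem pvInnerAux (pd : List (List Int)) (N M iN : Nat) (hi1 : 1 ≤ iN) (hiN : iN < N)
    (dp : List (List Int)) (hsh : pvShape dp N M)
    (Hprev : ∀ j' < M, pvGet2 dp (iN - 1) j' = pvF pd (iN - 1) j')
    (Hcol : pvGet2 dp iN 0 = pvF pd iN 0) :
    ∀ u, u ≤ M - 1 →
    pvShape ((List.range u).foldl (fun dp (k : Nat) => pvInnerStep pd (iN : Int) dp (1 + (k : Int))) dp) N M ∧
    (∀ i' j', i' ≠ iN ∨ j' = 0 →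
      pvGet2 ((List.range u).foldl (fun dp (k : Nat) => pvInnerStep pd (iN : Int) dp (1 + (k : Int))) dp) i' j' = pvGet2 dp i' j') ∧
    (∀ j', 1 ≤ j' → j' ≤ u →
      pvGet2 ((List.range u).foldl (fun dp (k : Nat) => pvInnerStep pd (iN : Int) dp (1 + (k : Int))) dp) iN j' = pvF pd iN j') := by
  intro u
  induction u with
  | zero => intro _; exact ⟨hsh, fun _ _ _ => rfl, by omega⟩
  | succ u ih =>
    intro hu
    obtain ⟨ish, iun, icell⟩ := ih (by omega)
    rw [List.range_succ, List.foldl_append]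
    set R := (List.range u).foldl (fun dp (k : Nat) => pvInnerStep pd (iN : Int) dp (1 + (k : Int))) dp with hR
    have hjM : 1 + u < M := by omega
    have hleni : iN < R.length := by rw [ish.1]; exact hiN
    have hlenj : 1 + u < (R.getD iN []).length := by rw [ish.2 iN hiN]; exact hjM
    have htoNatI : ((iN : Nat) : Int).toNat = iN := by omega
    have htoNatJ : ((1 : Int) + (u : Int)).toNat = 1 + u := by omega
    -- the two reads
    have hread1 : pvGet2 R (iN - 1) (1 + u) = pvF pd (iN - 1) (1 + u) := by
      rw [iun (iN - 1) (1 + u) (Or.inl (by omega))]; exact Hprev (1 + u) hjM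
    have hread2 : pvGet2 R iN ((1 + u) - 1) = pvF pd iN u := by
      rcases Nat.eq_zero_or_pos u with hz | hpos
      · subst hz
        simpa using (iun iN 0 (Or.inr rfl)).trans Hcol
      · have : (1 + u) - 1 = u := by omega
        rw [this]; exact icell u (by omega) (by omega)
    -- the written value equals pvF pd iN (1 + u)
    obtain ⟨iN', rfl⟩ : ∃ a, iN = a + 1 := ⟨iN - 1, by omega⟩
    have hstep : pvF pd (iN' + 1) (u + 1)
        = if pd.contains [(u : Int) + 2, (iN' : Int) + 2] then 0
          else PySem.Int.mod (pvF pd iN' (u + 1) + pvF pd (iN' + 1) u) 1000000007 := by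
      rw [pvF]
    have hcoordJ : (1 : Int) + (u : Int) + 1 = (u : Int) + 2 := by ring
    have hcoordI : ((iN' + 1 : Nat) : Int) + 1 = (iN' : Int) + 2 := by push_cast; ring
    simp only [List.foldl_cons, List.foldl_nil, pvInnerStep, htoNatI, htoNatJ, hcoordJ, hcoordI]
    have h1u : 1 + u = u + 1 := by omega
    cases hp : pd.contains [(u : Int) + 2, (iN' : Int) + 2]
    · simp only [Bool.false_eq_true, if_false]
      refine ⟨pvShape_set2 ish _ _ _, ?_, ?_⟩
      · intro i' j' h
        rw [pvGet2_pvSet2_ne _ _ _ _ _ _ (by omega)]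
        exact iun i' j' h
      · intro j' h1 h2
        by_cases hj : j' = 1 + u
        · subst hj
          rw [pvGet2_pvSet2_eq _ _ _ _ hleni hlenj]
          rw [hread1, hread2]
          rw [h1u, hstep, hp]
          simp only [Bool.false_eq_true, if_false]
          norm_num
        · rw [pvGet2_pvSet2_ne _ _ _ _ _ _ (Or.inr hj)]
          exact icell j' h1 (by omega)
    · simp only [if_true]
      refine ⟨pvShape_set2 (pvShape_set2 ish _ _ _) _ _ _, ?_, ?_⟩
      · intro i' j' h
        rw [pvGet2_pvSet2_ne _ _ _ _ _ _ (by omega), pvGet2_pvSet2_ne _ _ _ _ _ _ (by omega)]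
        exact iun i' j' h
      · intro j' h1 h2
        by_cases hj : j' = 1 + u
        · subst hj
          set V := PySem.Int.mod (pvGet2 R (iN' + 1 - 1) (1 + u) + pvGet2 R (iN' + 1) (1 + u - 1)) 1000000007 with hV
          have hleni' : iN' + 1 < (pvSet2 R (iN' + 1) (1 + u) V).length := by
            rw [pvSet2_length]; exact hleni
          have hlenj' : 1 + u < ((pvSet2 R (iN' + 1) (1 + u) V).getD (iN' + 1) []).length := by
            rw [pvSet2_rowlen]; exact hlenj
          rw [pvGet2_pvSet2_eq _ _ _ _ hleni' hlenj']
          rw [h1u, hstep, hp]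
          simp
        · rw [pvGet2_pvSet2_ne _ _ _ _ _ _ (Or.inr hj), pvGet2_pvSet2_ne _ _ _ _ _ _ (Or.inr hj)]
          exact icell j' h1 (by omega)

theorem pvOuterAux (pd : List (List Int)) (N M : Nat) (hM : 0 < M)
    (dp0 : List (List Int)) (hsh : pvShape dp0 N M)
    (H0 : ∀ j' < M, pvGet2 dp0 0 j' = pvF pd 0 j')
    (Hc : ∀ i' < N, pvGet2 dp0 i' 0 = pvF pd i' 0) :
    ∀ u, u ≤ N - 1 →
    pvShape ((List.range u).foldl (fun dp (k : Nat) =>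
        (List.range (M - 1)).foldl (fun dp (k2 : Nat) => pvInnerStep pd (1 + (k : Int)) dp (1 + (k2 : Int))) dp) dp0) N M ∧
    (∀ i' j', i' < N → j' < M → (i' ≤ u ∨ j' = 0) →
      pvGet2 ((List.range u).foldl (fun dp (k : Nat) =>
        (List.range (M - 1)).foldl (fun dp (k2 : Nat) => pvInnerStep pd (1 + (k : Int)) dp (1 + (k2 : Int))) dp) dp0) i' j' = pvF pd i' j') := by
  intro u
  induction u with
  | zero =>
    intro _
    refine ⟨hsh, fun i' j' hi hj h => ?_⟩
    rcases h with h | h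
    · interval_cases i'
      exact H0 j' hj
    · subst h; exact Hc i' hi
  | succ u ih =>
    intro hu
    obtain ⟨ish, icell⟩ := ih (by omega)
    rw [List.range_succ, List.foldl_append]
    set F := (List.range u).foldl (fun dp (k : Nat) =>
        (List.range (M - 1)).foldl (fun dp (k2 : Nat) => pvInnerStep pd (1 + (k : Int)) dp (1 + (k2 : Int))) dp) dp0 with hF
    simp only [List.foldl_cons, List.foldl_nil]
    have hcast : (1 : Int) + (u : Int) = ((1 + u : Nat) : Int) := by push_cast; ring
    rw [hcast]
    have hiN : 1 + u < N := by omega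
    obtain ⟨rsh, run, rcell⟩ := pvInnerAux pd N M (1 + u) (by omega) hiN F ish
      (by
        intro j' hj
        have : 1 + u - 1 = u := by omega
        rw [this]
        exact icell u j' (by omega) hj (Or.inl le_rfl))
      (icell (1 + u) 0 hiN hM (Or.inr rfl))
      (M - 1) le_rfl
    refine ⟨rsh, fun i' j' hi hj h => ?_⟩
    by_cases hieq : i' = 1 + u
    · subst hieq
      rcases Nat.eq_zero_or_pos j' with hz | hpos
      · subst hz
        rw [run _ _ (Or.inr rfl)]
        exact icell (1 + u) 0 hi hM (Or.inr rfl)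
      · exact rcell j' hpos (by omega)
    · rw [run i' j' (Or.inl hieq)]
      rcases h with h | h
      · exact icell i' j' hi hj (Or.inl (by omega))
      · exact icell i' j' hi hj (Or.inr h)

def pvApipe (m : Int) (n : Int) (pd : List (List Int)) : Int :=
  let dp0 : List (List Int) := (PySem.List.pyRange 0 n 1).map (fun _ => List.replicate m.toNat 0)
  let dp1 := pvSet2 dp0 0 0 1
  let s1 := (PySem.List.pyRange 0 m 1).foldl (pvRowStep pd) (dp1, false)
  let s2 := (PySem.List.pyRange 0 n 1).foldl (pvColStep pd) (s1.1, false)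
  let dp2 := (PySem.List.pyRange 1 n 1).foldl (fun dp i =>
      (PySem.List.pyRange 1 m 1).foldl (pvInnerStep pd i) dp) s2.1
  pvGet2 dp2 (n - 1).toNat (m - 1).toNat

theorem solution_eq_pipe (m n : Int) (pd : List (List Int)) : solution m n pd = pvApipe m n pd := rfl

theorem pvA_val (m n : Int) (pd : List (List Int)) (hm : 1 ≤ m) (hn : 1 ≤ n) :
    solution m n pd = pvF pd (n.toNat - 1) (m.toNat - 1) := by
  rw [solution_eq_pipe]
  set N := n.toNat with hNdef
  set M := m.toNat with hMdef
  have hN : 0 < N := by omega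
  have hM : 0 < M := by omega
  have hrn : PySem.List.pyRange 0 n 1 = (List.range N).map (fun (k : Nat) => 0 + (k : Int)) := by
    rw [PySem.List.pyRange_one]
    norm_num
    rw [hNdef]
  have hrm : PySem.List.pyRange 0 m 1 = (List.range M).map (fun (k : Nat) => 0 + (k : Int)) := by
    rw [PySem.List.pyRange_one]
    norm_num
    rw [hMdef]
  have hrn1 : PySem.List.pyRange 1 n 1 = (List.range (N - 1)).map (fun (k : Nat) => 1 + (k : Int)) := by
    rw [PySem.List.pyRange_one]
    have : (n - 1).toNat = N - 1 := by omega
    rw [this]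
  have hrm1 : PySem.List.pyRange 1 m 1 = (List.range (M - 1)).map (fun (k : Nat) => 1 + (k : Int)) := by
    rw [PySem.List.pyRange_one]
    have : (m - 1).toNat = M - 1 := by omega
    rw [this]
  unfold pvApipe
  simp only [hrn, hrm, hrn1, hrm1, List.foldl_map, List.map_map, Function.comp_def]
  -- initial table
  have hdp0 : List.map (fun (_ : Nat) => List.replicate m.toNat (0 : Int)) (List.range N)
      = List.replicate N (List.replicate M 0) := by
    rw [List.map_const']
    simp [hMdef]
  rw [hdp0]
  have hsh0 : pvShape (List.replicate N (List.replicate M (0 : Int))) N M :=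
    ⟨by simp, fun i' hi' => by rw [List.getD_eq_getElem?_getD]; simp [List.getElem?_replicate, hi']⟩
  have hsh1 : pvShape (pvSet2 (List.replicate N (List.replicate M (0 : Int))) 0 0 1) N M :=
    pvShape_set2 hsh0 0 0 1
  obtain ⟨rsh, _, rcell, _⟩ := pvRowPass pd N M _ hsh1 hN M le_rfl
  obtain ⟨csh, _, ccell, cun⟩ := pvColPass pd N M _ rsh hM N le_rfl
  obtain ⟨_, ocell⟩ := pvOuterAux pd N M hM _ csh
    (by
      intro j' hj
      rcases Nat.eq_zero_or_pos j' with hz | hpos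
      · subst hz; exact ccell 0 hN
      · rw [cun 0 j' (Or.inl (by omega))]
        exact rcell j' hj)
    (fun i' hi => ccell i' hi)
    (N - 1) le_rfl
  have h1 : (n - 1).toNat = N - 1 := by omega
  have h2 : (m - 1).toNat = M - 1 := by omega
  rw [h1, h2]
  exact ocell (N - 1) (M - 1) (by omega) (by omega) (Or.inl le_rfl)

-- ========== B-side proof: the stack machine fills the memo table with pvF values ==========

-- uniform characterization of pvF
theorem pvF_eq (pd : List (List Int)) (a b : Nat) :
    pvF pd a b =
      if pd.contains [(b : Int) + 1, (a : Int) + 1] then 0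
      else if a = 0 ∧ b = 0 then 1
      else PySem.Int.mod
        ((if 0 < a then pvF pd (a - 1) b else 0) + (if 0 < b then pvF pd a (b - 1) else 0))
        1000000007 := by
  match a, b with
  | 0, 0 => simp [pvF]
  | 0, b + 1 =>
    rw [pvF]
    simp only [Nat.cast_add, Nat.cast_one, Nat.add_sub_cancel]
    norm_num
    rw [show ((b : Int) + 1 + 1) = (b : Int) + 2 from by ring]
  | a + 1, 0 =>
    rw [pvF]
    simp only [Nat.cast_add, Nat.cast_one, Nat.add_sub_cancel]
    norm_num
    rw [show ((a : Int) + 1 + 1) = (a : Int) + 2 from by ring]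
  | a + 1, b + 1 =>
    rw [pvF]
    simp only [Nat.cast_add, Nat.cast_one, Nat.add_sub_cancel]
    norm_num
    rw [show ((b : Int) + 1 + 1) = (b : Int) + 2 from by ring,
      show ((a : Int) + 1 + 1) = (a : Int) + 2 from by ring]

-- Nat-indexed view of the memo table
def pvGetP (memo : List (List (Option Int))) (a b : Nat) : Option Int :=
  (memo.getD a []).getD b none
def pvSetP (memo : List (List (Option Int))) (a b : Nat) (v : Option Int) :
    List (List (Option Int)) :=
  memo.set a ((memo.getD a []).set b v)

theorem pvCellB_eq (memo : List (List (Option Int))) (i j : Int) (hi : 0 ≤ i) (hj : 0 ≤ j) :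
    pvCellB memo i j = pvGetP memo i.toNat j.toNat := by
  unfold pvCellB pvRowB pvGetP
  rw [PySem.List.pyGet?_of_nonneg _ hi, List.getD_eq_getElem?_getD,
    PySem.List.pyGet?_of_nonneg _ hj, List.getD_eq_getElem?_getD]
  cases ((memo[i.toNat]?).getD [])[j.toNat]? <;> rfl

theorem pvWriteB_eq (memo : List (List (Option Int))) (i j : Int) (v : Int)
    (hi : 0 ≤ i) : pvWriteB memo i j v = pvSetP memo i.toNat j.toNat (some v) := by
  unfold pvWriteB pvRowB pvSetP
  rw [PySem.List.pyGet?_of_nonneg _ hi, List.getD_eq_getElem?_getD]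

theorem pvSetP_length (memo : List (List (Option Int))) (a b : Nat) (v : Option Int) :
    (pvSetP memo a b v).length = memo.length := by simp [pvSetP]

theorem pvSetP_rowlen (memo : List (List (Option Int))) (a b : Nat) (v : Option Int) (a' : Nat) :
    ((pvSetP memo a b v).getD a' []).length = (memo.getD a' []).length := by
  unfold pvSetP
  by_cases h : a = a'
  · subst h
    by_cases hl : a < memo.length
    · simp [List.getD, List.getElem?_set_self hl]
    · rw [List.set_eq_of_length_le (by omega)]
  · simp [List.getD, List.getElem?_set_ne h]

theorem pvGetP_pvSetP_ne (memo : List (List (Option Int))) (a b a' b' : Nat) (v : Option Int)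
    (h : a' ≠ a ∨ b' ≠ b) : pvGetP (pvSetP memo a b v) a' b' = pvGetP memo a' b' := by
  unfold pvGetP pvSetP
  by_cases ha : a = a'
  · subst ha
    rcases h with h | h
    · omega
    · by_cases hl : a < memo.length
      · simp [List.getD, List.getElem?_set_self hl, List.getElem?_set_ne (fun hh => h hh.symm)]
      · rw [List.set_eq_of_length_le (by omega)]
  · simp [List.getD, List.getElem?_set_ne ha]

theorem pvGetP_pvSetP_eq (memo : List (List (Option Int))) (a b : Nat) (v : Option Int)
    (ha : a < memo.length) (hb : b < (memo.getD a []).length) :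
    pvGetP (pvSetP memo a b v) a b = v := by
  unfold pvGetP pvSetP
  have hb' : b < (memo[a]?.getD []).length := by simpa [List.getD] using hb
  simp [List.getD, List.getElem?_set_self ha, List.getElem?_set_self hb']

-- shape invariant: an N × M table
def pvShapeO (memo : List (List (Option Int))) (N M : Nat) : Prop :=
  memo.length = N ∧ ∀ a < N, (memo.getD a []).length = M

theorem pvShapeO_setP {memo : List (List (Option Int))} {N M : Nat}
    (h : pvShapeO memo N M) (a b : Nat) (v : Option Int) :
    pvShapeO (pvSetP memo a b v) N M := by
  obtain ⟨h1, h2⟩ := h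
  exact ⟨by rw [pvSetP_length, h1], fun a' ha' => by rw [pvSetP_rowlen]; exact h2 a' ha'⟩

-- every filled memo cell holds its correct pvF value
def pvMemoOK (pd : List (List Int)) (memo : List (List (Option Int))) : Prop :=
  ∀ a b v, pvGetP memo a b = some v → v = pvF pd a b

theorem pvMemoOK_setP (pd : List (List Int)) (memo : List (List (Option Int)))
    (a b : Nat) (ha : a < memo.length) (hb : b < (memo.getD a []).length)
    (hOK : pvMemoOK pd memo) :
    pvMemoOK pd (pvSetP memo a b (some (pvF pd a b))) := by
  intro a' b' v hv
  by_cases h : a' = a ∧ b' = b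
  · rw [h.1, h.2, pvGetP_pvSetP_eq memo a b _ ha hb] at hv
    rw [h.1, h.2]
    exact (Option.some.injEq .. ▸ hv).symm
  · rw [pvGetP_pvSetP_ne _ _ _ _ _ _ (by tauto)] at hv
    exact hOK a' b' v hv

-- membership in the deps list pins the dep's coordinates
theorem pvDeps_mem (memo : List (List (Option Int))) (i j : Int) (p : Int × Int)
    (hp : p ∈ pvDeps memo i j) :
    (p = (i - 1, j) ∧ 0 < i) ∨ (p = (i, j - 1) ∧ 0 < j) := by
  unfold pvDeps at hp
  rw [List.mem_append] at hp
  rcases hp with hp | hp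
  · left
    split_ifs at hp with h
    · simp only [List.mem_singleton] at hp
      simp only [Bool.and_eq_true, decide_eq_true_eq] at h
      exact ⟨hp, h.1⟩
    · simp at hp
  · right
    split_ifs at hp with h
    · simp only [List.mem_singleton] at hp
      simp only [Bool.and_eq_true, decide_eq_true_eq] at h
      exact ⟨hp, h.1⟩
    · simp at hp

-- a resolvable top cell (not memoized, and puddle or deps exhausted) is popped and
-- memoized with its correct pvF value in one step
theorem pvStepResolve (pd : List (List Int)) (i j : Int) (hi : 0 ≤ i) (hj : 0 ≤ j)
    (rest : List (Int × Int)) (memo : List (List (Option Int))) (hOK : pvMemoOK pd memo)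
    (hnm : pvCellB memo i j = none)
    (hres : pd.contains [j + 1, i + 1] = true ∨ pvDeps memo i j = []) :
    pvStepB pd ((i, j) :: rest, memo)
      = (rest, pvSetP memo i.toNat j.toNat (some (pvF pd i.toNat j.toNat))) := by
  have hiN : ((i.toNat : Int)) = i := Int.toNat_of_nonneg hi
  have hjN : ((j.toNat : Int)) = j := Int.toNat_of_nonneg hj
  rw [pvStepB]
  simp only [hnm, Option.isSome_none, Bool.false_eq_true, if_false]
  by_cases hp : pd.contains [j + 1, i + 1] = true
  · have hv : pvF pd i.toNat j.toNat = 0 := by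
      rw [pvF_eq, hjN, hiN, hp]; simp
    rw [hv, pvWriteB_eq memo i j 0 hi]
    simp only [hp, if_true]
  · have hdeps : pvDeps memo i j = [] := hres.resolve_left hp
    simp only [hp, if_false]
    by_cases ho : i = 0 ∧ j = 0
    · obtain ⟨rfl, rfl⟩ := ho
      have hv : pvF pd (0 : Int).toNat (0 : Int).toNat = 1 := by
        rw [pvF_eq]
        simp only [Int.toNat_zero, Nat.cast_zero, zero_add]
        rw [if_neg (by simpa using hp)]
        simp
      rw [hv, pvWriteB_eq memo 0 0 1 le_rfl]
      simp
    · have ho' : (i == 0 && j == 0) = false := by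
        rcases (not_and_or.mp ho) with h | h <;> simp [h]
      simp only [ho', Bool.false_eq_true, if_false, hdeps, List.isEmpty_nil, Bool.not_true,
        if_false, List.reverse_nil, List.nil_append]
      -- deps = [] makes each needed neighbour present in memo
      have hd1 : 0 < i → ∃ v, pvCellB memo (i - 1) j = some v := by
        intro hpos
        rcases hs : pvCellB memo (i - 1) j with _ | v
        · exfalso
          unfold pvDeps at hdeps
          rw [List.append_eq_nil_iff] at hdeps
          have h1 := hdeps.1
          rw [if_pos (by simp [hpos, hs])] at h1
          exact List.cons_ne_nil _ _ h1
        · exact ⟨v, rfl⟩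
      have hd2 : 0 < j → ∃ v, pvCellB memo i (j - 1) = some v := by
        intro hpos
        rcases hs : pvCellB memo i (j - 1) with _ | v
        · exfalso
          unfold pvDeps at hdeps
          rw [List.append_eq_nil_iff] at hdeps
          have h2 := hdeps.2
          rw [if_pos (by simp [hpos, hs])] at h2
          exact List.cons_ne_nil _ _ h2
        · exact ⟨v, rfl⟩
      have htop : (if i > 0 then (pvCellB memo (i - 1) j).getD 0 else 0)
          = (if 0 < i.toNat then pvF pd (i.toNat - 1) j.toNat else 0) := by
        by_cases hpos : 0 < i
        · obtain ⟨v, hv⟩ := hd1 hpos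
          have hval : v = pvF pd (i - 1).toNat j.toNat := by
            apply hOK
            rw [← pvCellB_eq memo (i - 1) j (by omega) hj]
            exact hv
          rw [if_pos hpos, if_pos (by omega), hv, Option.getD_some, hval]
          have e1 : (i - 1).toNat = i.toNat - 1 := by omega
          rw [e1]
        · rw [if_neg hpos, if_neg (by omega)]
      have hleft : (if j > 0 then (pvCellB memo i (j - 1)).getD 0 else 0)
          = (if 0 < j.toNat then pvF pd i.toNat (j.toNat - 1) else 0) := by
        by_cases hpos : 0 < j
        · obtain ⟨v, hv⟩ := hd2 hpos
          have hval : v = pvF pd i.toNat (j - 1).toNat := by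
            apply hOK
            rw [← pvCellB_eq memo i (j - 1) hi (by omega)]
            exact hv
          rw [if_pos hpos, if_pos (by omega), hv, Option.getD_some, hval]
          have e1 : (j - 1).toNat = j.toNat - 1 := by omega
          rw [e1]
        · rw [if_neg hpos, if_neg (by omega)]
      have hv : pvF pd i.toNat j.toNat
          = PySem.Int.mod ((if 0 < i.toNat then pvF pd (i.toNat - 1) j.toNat else 0)
              + (if 0 < j.toNat then pvF pd i.toNat (j.toNat - 1) else 0)) 1000000007 := by
        rw [pvF_eq, hjN, hiN]
        rw [if_neg (by simpa using hp), if_neg (by omega)]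
      rw [hv, htop, hleft, pvWriteB_eq memo i j _ hi]

-- processing the top entry of the stack: within 4^(s+1) steps it is popped,
-- the memo only grows, and the entry's correct value has been memoized
theorem pvProc (pd : List (List Int)) (N M : Nat) :
    ∀ s : Nat, ∀ i j : Int, 0 ≤ i → i < (N : Int) → 0 ≤ j → j < (M : Int) →
    (i + j).toNat ≤ s →
    ∀ memo rest, pvShapeO memo N M → pvMemoOK pd memo →
    ∃ k memo', k ≤ 4 ^ (s + 1) ∧
      (pvStepB pd)^[k] ((i, j) :: rest, memo) = (rest, memo') ∧
      pvShapeO memo' N M ∧ pvMemoOK pd memo' ∧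
      (∀ a b v, pvGetP memo a b = some v → pvGetP memo' a b = some v) ∧
      pvGetP memo' i.toNat j.toNat = some (pvF pd i.toNat j.toNat) := by
  intro s
  induction s with
  | zero =>
    intro i j hi hiN hj hjM hs memo rest hsh hOK
    have h0 : i = 0 ∧ j = 0 := by omega
    obtain ⟨rfl, rfl⟩ := h0
    cases hnm : pvCellB memo 0 0 with
    | some v =>
      refine ⟨1, memo, by norm_num, ?_, hsh, hOK, fun _ _ _ h => h, ?_⟩
      · rw [Function.iterate_one, pvStepB]
        simp [hnm]
      · have h' : pvGetP memo (0 : Int).toNat (0 : Int).toNat = some v := by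
          rw [← pvCellB_eq memo 0 0 le_rfl le_rfl]; exact hnm
        rw [← pvCellB_eq memo 0 0 le_rfl le_rfl, hnm, hOK _ _ _ h']
    | none =>
      have hdeps : pvDeps memo 0 0 = [] := by unfold pvDeps; simp
      have hiz : (0 : Int).toNat < memo.length := by rw [hsh.1]; omega
      have hjz : (0 : Int).toNat < (memo.getD (0 : Int).toNat []).length := by
        rw [hsh.2 _ (by rw [hsh.1] at hiz; omega)]; omega
      refine ⟨1, _, by norm_num, ?_, pvShapeO_setP hsh _ _ _,
        pvMemoOK_setP pd memo _ _ hiz hjz hOK, ?_, ?_⟩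
      · rw [Function.iterate_one,
          pvStepResolve pd 0 0 le_rfl le_rfl rest memo hOK hnm (Or.inr hdeps)]
      · intro a b v hv
        by_cases h : a = (0 : Int).toNat ∧ b = (0 : Int).toNat
        · obtain ⟨rfl, rfl⟩ := h
          rw [← pvCellB_eq memo 0 0 le_rfl le_rfl] at hv
          rw [hv] at hnm; cases hnm
        · rw [pvGetP_pvSetP_ne _ _ _ _ _ _ (by tauto)]
          exact hv
      · exact pvGetP_pvSetP_eq memo _ _ _ (by rw [hsh.1]; omega)
          (by rw [hsh.2 _ (by rw [hsh.1] at *; omega)]; omega)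
  | succ s ih =>
    intro i j hi hiN hj hjM hs memo rest hsh hOK
    have hin : i.toNat < memo.length := by rw [hsh.1]; omega
    have hjm : j.toNat < (memo.getD i.toNat []).length := by
      rw [hsh.2 i.toNat (by omega)]; omega
    cases hnm : pvCellB memo i j with
    | some v =>
      refine ⟨1, memo, Nat.one_le_pow _ _ (by norm_num), ?_, hsh, hOK, fun _ _ _ h => h, ?_⟩
      · rw [Function.iterate_one, pvStepB]
        simp [hnm]
      · have h' : pvGetP memo i.toNat j.toNat = some v := by
          rw [← pvCellB_eq memo i j hi hj]; exact hnm
        rw [← pvCellB_eq memo i j hi hj, hnm, hOK _ _ _ h']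
    | none =>
      by_cases hres : pd.contains [j + 1, i + 1] = true ∨ pvDeps memo i j = []
      · refine ⟨1, _, Nat.one_le_pow _ _ (by norm_num), ?_, pvShapeO_setP hsh _ _ _,
          pvMemoOK_setP pd memo _ _ hin hjm hOK, ?_, ?_⟩
        · rw [Function.iterate_one, pvStepResolve pd i j hi hj rest memo hOK hnm hres]
        · intro a b v hv
          by_cases h : a = i.toNat ∧ b = j.toNat
          · obtain ⟨rfl, rfl⟩ := h
            rw [← pvCellB_eq memo i j hi hj] at hv
            rw [hv] at hnm; cases hnm
          · rw [pvGetP_pvSetP_ne _ _ _ _ _ _ (by tauto)]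
            exact hv
        · exact pvGetP_pvSetP_eq memo _ _ _ hin hjm
      · push_neg at hres
        obtain ⟨hp, hdne⟩ := hres
        have hp' : pd.contains [j + 1, i + 1] = false := by
          cases h : pd.contains [j + 1, i + 1]
          · rfl
          · exact absurd h hp
        have ho' : (i == 0 && j == 0) = false := by
          by_contra h
          have h2 : (i == 0 && j == 0) = true := by
            cases h3 : (i == 0 && j == 0)
            · exact absurd h3 h
            · rfl
          obtain ⟨h4, h5⟩ := by simpa only [Bool.and_eq_true] using h2
          apply hdne
          unfold pvDeps
          rw [if_neg (by simp [by simpa using h4]), if_neg (by simp [by simpa using h5])]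
          rfl
        -- step 1: extend
        have hstep1 : pvStepB pd ((i, j) :: rest, memo)
            = ((pvDeps memo i j).reverse ++ (i, j) :: rest, memo) := by
          rw [pvStepB]
          simp only [hnm, Option.isSome_none, Bool.false_eq_true, if_false, hp', ho']
          rw [if_pos (by simpa [List.isEmpty_iff] using hdne)]
        -- process every dep (each has coordinate sum ≤ s) via ih
        have hlist : ∀ (L : List (Int × Int)),
            (∀ p ∈ L, 0 ≤ p.1 ∧ p.1 < (N : Int) ∧ 0 ≤ p.2 ∧ p.2 < (M : Int) ∧
              (p.1 + p.2).toNat ≤ s) →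
            ∀ memo0 rest0, pvShapeO memo0 N M → pvMemoOK pd memo0 →
            ∃ k memo', k ≤ L.length * 4 ^ (s + 1) ∧
              (pvStepB pd)^[k] (L ++ rest0, memo0) = (rest0, memo') ∧
              pvShapeO memo' N M ∧ pvMemoOK pd memo' ∧
              (∀ a b v, pvGetP memo0 a b = some v → pvGetP memo' a b = some v) ∧
              (∀ p ∈ L, pvGetP memo' p.1.toNat p.2.toNat
                = some (pvF pd p.1.toNat p.2.toNat)) := by
          intro L
          induction L with
          | nil =>
            intro _ memo0 rest0 hsh0 hOK0
            exact ⟨0, memo0, by simp, rfl, hsh0, hOK0, fun _ _ _ h => h, by simp⟩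
          | cons q L' ihL =>
            intro hL memo0 rest0 hsh0 hOK0
            obtain ⟨hq1, hq2, hq3, hq4, hq5⟩ := hL q List.mem_cons_self
            obtain ⟨kq, m1, hkq, hitq, hsh1, hOK1, hsub1, hgetq⟩ :=
              ih q.1 q.2 hq1 hq2 hq3 hq4 hq5 memo0 (L' ++ rest0) hsh0 hOK0
            obtain ⟨kL, m2, hkL, hitL, hsh2, hOK2, hsub2, hgetL⟩ :=
              ihL (fun p hp => hL p (List.mem_cons_of_mem _ hp)) m1 rest0 hsh1 hOK1
            refine ⟨kL + kq, m2, ?_, ?_, hsh2, hOK2,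
              fun a b v hv => hsub2 a b v (hsub1 a b v hv), ?_⟩
            · simp only [List.length_cons]
              calc kL + kq ≤ L'.length * 4 ^ (s + 1) + 4 ^ (s + 1) := by omega
                _ = (L'.length + 1) * 4 ^ (s + 1) := by ring
            · rw [Function.iterate_add_apply]
              have hq : ((q.1, q.2) : Int × Int) = q := rfl
              rw [show (q :: L' ++ rest0 : List (Int × Int)) = q :: (L' ++ rest0) from rfl,
                ← hq, hitq, hitL]
            · intro p hp
              rcases List.mem_cons.mp hp with rfl | hp'
              · exact hsub2 _ _ _ hgetq
              · exact hgetL p hp'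
        obtain ⟨kL, m2, hkL, hitL, hsh2, hOK2, hsub2, hgetL⟩ :=
          hlist (pvDeps memo i j).reverse
            (by
              intro p hp
              rcases pvDeps_mem memo i j p (List.mem_reverse.mp hp) with ⟨rfl, hpos⟩ | ⟨rfl, hpos⟩
              · exact ⟨by omega, by simp; omega, by simpa using hj, by simpa using hjM, by simp; omega⟩
              · exact ⟨by simpa using hi, by simpa using hiN, by omega, by simp; omega, by simp; omega⟩)
            memo ((i, j) :: rest) hsh hOK
        have hrevlen : (pvDeps memo i j).reverse.length ≤ 2 := by
          rw [List.length_reverse]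
          unfold pvDeps
          rw [List.length_append]
          split_ifs <;> simp
        -- the revisit of (i, j) resolves in one step
        have hfinal : ∃ memo', pvStepB pd ((i, j) :: rest, m2) = (rest, memo') ∧
            pvShapeO memo' N M ∧ pvMemoOK pd memo' ∧
            (∀ a b v, pvGetP m2 a b = some v → pvGetP memo' a b = some v) ∧
            pvGetP memo' i.toNat j.toNat = some (pvF pd i.toNat j.toNat) := by
          cases hnm2 : pvCellB m2 i j with
          | some v =>
            refine ⟨m2, ?_, hsh2, hOK2, fun _ _ _ h => h, ?_⟩
            · rw [pvStepB]; simp [hnm2]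
            · have h' : pvGetP m2 i.toNat j.toNat = some v := by
                rw [← pvCellB_eq m2 i j hi hj]; exact hnm2
              rw [← pvCellB_eq m2 i j hi hj, hnm2, hOK2 _ _ _ h']
          | none =>
            have hdeps2 : pvDeps m2 i j = [] := by
              have hn1 : 0 < i → ∃ v, pvCellB m2 (i - 1) j = some v := by
                intro hpos
                rw [pvCellB_eq m2 (i - 1) j (by omega) hj]
                cases hm : pvCellB memo (i - 1) j with
                | some v =>
                  rw [pvCellB_eq memo (i - 1) j (by omega) hj] at hm
                  exact ⟨v, hsub2 _ _ _ hm⟩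
                | none =>
                  refine ⟨_, hgetL (i - 1, j) ?_⟩
                  rw [List.mem_reverse]
                  unfold pvDeps
                  rw [List.mem_append]
                  left
                  rw [if_pos (by simp [hpos, hm])]
                  exact List.mem_singleton.mpr rfl
              have hn2 : 0 < j → ∃ v, pvCellB m2 i (j - 1) = some v := by
                intro hpos
                rw [pvCellB_eq m2 i (j - 1) hi (by omega)]
                cases hm : pvCellB memo i (j - 1) with
                | some v =>
                  rw [pvCellB_eq memo i (j - 1) hi (by omega)] at hm
                  exact ⟨v, hsub2 _ _ _ hm⟩
                | none =>
                  refine ⟨_, hgetL (i, j - 1) ?_⟩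
                  rw [List.mem_reverse]
                  unfold pvDeps
                  rw [List.mem_append]
                  right
                  rw [if_pos (by simp [hpos, hm])]
                  exact List.mem_singleton.mpr rfl
              unfold pvDeps
              rw [if_neg, if_neg]
              · rfl
              · simp only [Bool.and_eq_true, decide_eq_true_eq, not_and]
                intro hpos hnone
                obtain ⟨v, hv⟩ := hn2 hpos
                rw [hv] at hnone
                simp at hnone
              · simp only [Bool.and_eq_true, decide_eq_true_eq, not_and]
                intro hpos hnone
                obtain ⟨v, hv⟩ := hn1 hpos
                rw [hv] at hnone
                simp at hnone
            have hin2 : i.toNat < m2.length := by rw [hsh2.1]; omega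
            have hjm2 : j.toNat < (m2.getD i.toNat []).length := by
              rw [hsh2.2 i.toNat (by omega)]; omega
            refine ⟨_, pvStepResolve pd i j hi hj rest m2 hOK2 hnm2 (Or.inr hdeps2),
              pvShapeO_setP hsh2 _ _ _, pvMemoOK_setP pd m2 _ _ hin2 hjm2 hOK2, ?_, ?_⟩
            · intro a b v hv
              by_cases h : a = i.toNat ∧ b = j.toNat
              · obtain ⟨rfl, rfl⟩ := h
                rw [← pvCellB_eq m2 i j hi hj] at hv
                rw [hv] at hnm2; cases hnm2
              · rw [pvGetP_pvSetP_ne _ _ _ _ _ _ (by tauto)]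
                exact hv
            · exact pvGetP_pvSetP_eq m2 _ _ _ hin2 hjm2
        obtain ⟨memo', hstepF, hshF, hOKF, hsubF, hgetF⟩ := hfinal
        refine ⟨1 + (kL + 1), memo', ?_, ?_, hshF, hOKF,
          fun a b v hv => hsubF a b v (hsub2 a b v hv), hgetF⟩
        · have h4 : (1 : Nat) ≤ 4 ^ (s + 1) := Nat.one_le_pow _ _ (by norm_num)
          have hb : kL ≤ 2 * 4 ^ (s + 1) :=
            hkL.trans (Nat.mul_le_mul_right _ hrevlen)
          have hpow : 4 ^ (s + 1 + 1) = 4 ^ (s + 1) * 4 := pow_succ 4 (s + 1)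
          omega
        · rw [Function.iterate_add_apply, Function.iterate_add_apply]
          simp only [Function.iterate_one]
          rw [hstep1, hitL, hstepF]

-- the fueled while-loop follows the step iteration until the stack empties
theorem pvLoopB_of_iterate (pd : List (List Int)) :
    ∀ k (st : List (Int × Int) × List (List (Option Int))) memo',
    (pvStepB pd)^[k] st = ([], memo') → ∀ f, k ≤ f → pvLoopB pd f st = memo' := by
  intro k
  induction k with
  | zero =>
    intro st memo' hit f _
    rw [Function.iterate_zero_apply] at hit
    subst hit
    cases f <;> rfl
  | succ k ihk =>
    intro st memo' hit f hf
    rw [Function.iterate_succ_apply] at hit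
    obtain ⟨stk, memo⟩ := st
    cases stk with
    | nil =>
      have hid : pvStepB pd (([] : List (Int × Int)), memo) = ([], memo) := by rw [pvStepB]
      rw [hid] at hit
      exact ihk _ _ hit f (by omega)
    | cons p rest =>
      obtain ⟨f', rfl⟩ : ∃ f'', f = f'' + 1 := ⟨f - 1, by omega⟩
      rw [pvLoopB]
      exact ihk _ _ hit f' (by omega)

theorem pvB_val (m n : Int) (pd : List (List Int)) (hm : 1 ≤ m) (hn : 1 ≤ n) :
    solution_alt m n pd = pvF pd (n.toNat - 1) (m.toNat - 1) := by
  set N := n.toNat with hNdef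
  set M := m.toNat with hMdef
  set memo0 : List (List (Option Int)) :=
    (PySem.List.pyRange 0 n 1).map (fun _ => List.replicate m.toNat none) with hmemo0
  have hlen0 : memo0.length = N := by
    rw [hmemo0, List.length_map, PySem.List.pyRange_one]
    simp [hNdef]
  have hrow : ∀ a : Nat, a < N → memo0.getD a [] = List.replicate M none := by
    intro a ha
    rw [List.getD_eq_getElem?_getD, hmemo0, List.getElem?_map]
    cases h : (PySem.List.pyRange 0 n 1)[a]? with
    | none =>
      exfalso
      rw [List.getElem?_eq_none_iff] at h
      have := hlen0
      rw [hmemo0, List.length_map] at this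
      omega
    | some x => simp [hMdef]
  have hsh0 : pvShapeO memo0 N M := by
    refine ⟨hlen0, fun a ha => ?_⟩
    rw [hrow a ha]
    simp
  have hOK0 : pvMemoOK pd memo0 := by
    intro a b v hv
    exfalso
    unfold pvGetP at hv
    rcases Nat.lt_or_ge a N with ha | ha
    · rw [hrow a ha, List.getD_eq_getElem?_getD, List.getElem?_replicate] at hv
      split_ifs at hv <;> simp_all
    · have hempty : memo0.getD a [] = ([] : List (Option Int)) := by
        rw [List.getD_eq_getElem?_getD, List.getElem?_eq_none (by rw [hlen0]; omega)]
        rfl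
      rw [hempty] at hv
      simp at hv
  obtain ⟨k, memo', hk, hit, hsh', _, _, hget⟩ :=
    pvProc pd N M (((n - 1) + (m - 1)).toNat) (n - 1) (m - 1)
      (by omega) (by omega) (by omega) (by omega) le_rfl memo0 [] hsh0 hOK0
  rw [show solution_alt m n pd
      = (pvCellB (pvLoopB pd (4 ^ (((n - 1) + (m - 1)).toNat + 1))
          ([(n - 1, m - 1)], memo0)) (n - 1) (m - 1)).getD 0 from rfl]
  rw [pvLoopB_of_iterate pd k ([(n - 1, m - 1)], memo0) memo' hit _ hk]
  rw [pvCellB_eq memo' (n - 1) (m - 1) (by omega) (by omega), hget]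
  have e1 : (n - 1).toNat = N - 1 := by omega
  have e2 : (m - 1).toNat = M - 1 := by omega
  rw [e1, e2, Option.getD_some]

-- ===== VERDICT (by name: the statement is the Claim_ definition above) =====
theorem solution_spec : Claim_equal_solution := by
  intro m n puddles _ hpre
  unfold Spec_solution
  obtain ⟨hm, hn⟩ := hpre
  rw [pvA_val m n puddles hm hn, pvB_val m n puddles hm hn]
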